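-- pv_equiv track=rewrite | github.com/Gustavo-Galvao-e-Silva/CS1301-Projects | HW03.py | _calculate_remaining_time
-- ===== SOURCE A (Python) =====
-- def _calculate_remaining_time(password: str, maxTime: int) -> int:
--     digit_time_consumption = {
--         "aeiou": 2,
--         "02468": 5
--     }
--
--     remaining_time = maxTime
--     for char in password:
--         for char_group, time_consumed in digit_time_consumption.items():
--             remaining_time -= time_consumed if char in char_group else 0
--
--     return remaining_time
-- ===== SOURCE B (Python) =====
-- def _calculate_remaining_time(password: str, maxTime: int) -> int:
--     # Iterate over the ten priced characters, not over the password: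
--     # each priced character is counted in the password once.
--     chars = list(password)
--     price_list = [('a', 2), ('e', 2), ('i', 2), ('o', 2), ('u', 2),
--                   ('0', 5), ('2', 5), ('4', 5), ('6', 5), ('8', 5)]
--     return maxTime - sum(w * chars.count(ch) for ch, w in price_list)
-- ===== Notes on version B (the rewrite author's own statement) =====
-- stated objective: alternative
-- what changed: Inverts the traversal: instead of scanning the password character by character and decrementing an accumulator via membership tests against two group strings, B iterates over the ten priced characters themselves, counts each one's occurrences in the password with list.count, and subtracts the weighted count sum in one closed-form expression.
import Mathlib
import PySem

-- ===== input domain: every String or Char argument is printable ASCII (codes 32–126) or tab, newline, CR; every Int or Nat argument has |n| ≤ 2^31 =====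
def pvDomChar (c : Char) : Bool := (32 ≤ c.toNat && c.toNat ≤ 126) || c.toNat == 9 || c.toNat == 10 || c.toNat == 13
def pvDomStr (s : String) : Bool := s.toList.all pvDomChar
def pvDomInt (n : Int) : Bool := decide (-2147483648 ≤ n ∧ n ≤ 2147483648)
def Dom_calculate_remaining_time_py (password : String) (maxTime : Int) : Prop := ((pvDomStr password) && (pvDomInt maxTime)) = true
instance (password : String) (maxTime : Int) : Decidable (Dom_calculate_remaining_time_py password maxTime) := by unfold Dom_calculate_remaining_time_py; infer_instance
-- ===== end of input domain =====

-- B iterates over the ten priced characters counting each in the password, instead of scanning the password with per-character membership tests (alternative decomposition, same cost).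


-- ===== PORT A =====
def calculate_remaining_time_py (password : String) (maxTime : Int) : Int :=
  password.toList.foldl
    (fun remaining_time char =>
      [("aeiou", (2 : Int)), ("02468", (5 : Int))].foldl
        (fun r p => r - (if char ∈ p.1.toList then p.2 else 0)) remaining_time)
    maxTime

-- ===== PORT B =====
def pvPriceList : List (Char × Int) :=
  [('a', 2), ('e', 2), ('i', 2), ('o', 2), ('u', 2),
   ('0', 5), ('2', 5), ('4', 5), ('6', 5), ('8', 5)]

def calculate_remaining_time_py_alt (password : String) (maxTime : Int) : Int :=
  maxTime - (pvPriceList.map (fun p => p.2 * (PySem.List.count password.toList p.1 : Int))).sum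

-- ===== PRECONDITION & SPEC =====
def Spec_calculate_remaining_time_py (password : String) (maxTime : Int) (out : Int) : Prop := out = calculate_remaining_time_py_alt password maxTime
instance (password : String) (maxTime : Int) (out : Int) : Decidable (Spec_calculate_remaining_time_py password maxTime out) := by unfold Spec_calculate_remaining_time_py; infer_instance

-- ===== CLAIM (what is proved, stated in full; the proofs are below) =====
def Claim_equal_calculate_remaining_time_py : Prop := ∀ (password : String) (maxTime : Int), Dom_calculate_remaining_time_py password maxTime → Spec_calculate_remaining_time_py password maxTime (calculate_remaining_time_py password maxTime)

-- ===== LEMMAS AND PROOFS =====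

-- each character's total per-step cost in A equals its total weight across the price list
theorem pv_cost_eq (c : Char) :
    (if c ∈ "aeiou".toList then (2 : Int) else 0) + (if c ∈ "02468".toList then (5 : Int) else 0)
    = (pvPriceList.map (fun p => p.2 * (if p.1 = c then (1 : Int) else 0))).sum := by
  rw [show "aeiou".toList = ['a', 'e', 'i', 'o', 'u'] from rfl,
      show "02468".toList = ['0', '2', '4', '6', '8'] from rfl]
  by_cases h1 : c ∈ (['a', 'e', 'i', 'o', 'u'] : List Char)
  · fin_cases h1 <;> decide
  · by_cases h2 : c ∈ (['0', '2', '4', '6', '8'] : List Char)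
    · fin_cases h2 <;> decide
    · simp only [List.mem_cons, not_or] at h1 h2
      obtain ⟨a1, a2, a3, a4, a5, -⟩ := h1
      obtain ⟨b1, b2, b3, b4, b5, -⟩ := h2
      simp [pvPriceList, a1, a2, a3, a4, a5, b1, b2, b3, b4, b5,
        Ne.symm a1, Ne.symm a2, Ne.symm a3, Ne.symm a4, Ne.symm a5,
        Ne.symm b1, Ne.symm b2, Ne.symm b3, Ne.symm b4, Ne.symm b5]

-- peeling one password character off the weighted-count sum, for any price list
theorem pv_sum_count_cons (ps : List (Char × Int)) (c : Char) (t : List Char) :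
    (ps.map (fun p => p.2 * (List.count p.1 (c :: t) : Int))).sum
    = (ps.map (fun p => p.2 * (List.count p.1 t : Int))).sum
      + (ps.map (fun p => p.2 * (if p.1 = c then (1 : Int) else 0))).sum := by
  induction ps with
  | nil => simp
  | cons q qs ih =>
    have hq : (List.count q.1 (c :: t) : Int)
        = (List.count q.1 t : Int) + (if q.1 = c then (1 : Int) else 0) := by
      by_cases h : q.1 = c
      · simp only [List.count_cons, h, beq_self_eq_true, if_true]
        push_cast
        ring
      · simp [h, Ne.symm h]
    simp only [List.map_cons, List.sum_cons, hq, ih]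
    ring

theorem pv_main (l : List Char) (m : Int) :
    l.foldl
      (fun remaining_time char =>
        [("aeiou", (2 : Int)), ("02468", (5 : Int))].foldl
          (fun r p => r - (if char ∈ p.1.toList then p.2 else 0)) remaining_time)
      m
    = m - (pvPriceList.map (fun p => p.2 * (List.count p.1 l : Int))).sum := by
  induction l generalizing m with
  | nil => simp
  | cons c t ih =>
    rw [List.foldl_cons, ih, pv_sum_count_cons, ← pv_cost_eq c]
    simp only [List.foldl]
    ring

-- ===== VERDICT (by name: the statement is the Claim_ definition above) =====
theorem calculate_remaining_time_py_spec : Claim_equal_calculate_remaining_time_py := by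
  intro password maxTime _
  unfold Spec_calculate_remaining_time_py calculate_remaining_time_py calculate_remaining_time_py_alt
  rw [pv_main]
  simp [PySem.List.count]
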